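-- pv_equiv track=rewrite | github.com/boarderframe/BoarderframeOS | core/hq_metrics_layer.py | _get_department_color
-- ===== SOURCE A (Python) =====
-- class BFColors:
--     """Standardized color palette"""
--
--     # Status colors
--     SUCCESS = "#10b981"  # Green
--     WARNING = "#f59e0b"  # Amber
--     DANGER = "#ef4444"  # Red
--     INFO = "#3b82f6"  # Blue
--     NEUTRAL = "#6b7280"  # Gray
--
--     # Department category colors
--     EXECUTIVE = "#6366f1"  # Indigo
--     LEADERSHIP = "#8b5cf6"  # Purple
--     ENGINEERING = "#06b6d4"  # Cyan
--     OPERATIONS = "#10b981"  # Emerald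
--     INFRASTRUCTURE = "#f59e0b"  # Amber
--     INTELLIGENCE = "#ec4899"  # Pink
--     DEVELOPMENT = "#3b82f6"  # Blue
--     INNOVATION = "#a855f7"  # Purple
--     RESEARCH = "#14b8a6"  # Teal
--
--     # Division colors
--     DIVISION_1 = "#7c3aed"  # Violet
--     DIVISION_2 = "#2563eb"  # Blue
--     DIVISION_3 = "#059669"  # Emerald
--     DIVISION_4 = "#dc2626"  # Red
--     DIVISION_5 = "#7c2d12"  # Orange
--     DIVISION_6 = "#1e40af"  # Blue
--     DIVISION_7 = "#5b21b6"  # Purple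
--     DIVISION_8 = "#065f46"  # Green
--     DIVISION_9 = "#991b1b"  # Red
--
-- def _get_department_color(dept_name: str) -> str:
--     """Get color for department based on name/type"""
--     name_lower = dept_name.lower()
--
--     if any(x in name_lower for x in ["executive", "leadership", "management"]):
--         return BFColors.EXECUTIVE
--     elif any(x in name_lower for x in ["engineering", "development", "technical"]):
--         return BFColors.ENGINEERING
--     elif any(x in name_lower for x in ["operations", "business"]):
--         return BFColors.OPERATIONS
--     elif any(x in name_lower for x in ["infrastructure", "systems", "network"]):
--         return BFColors.INFRASTRUCTURE
--     elif any(x in name_lower for x in ["intelligence", "analytics", "data"]):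
--         return BFColors.INTELLIGENCE
--     elif any(x in name_lower for x in ["innovation", "research", "labs"]):
--         return BFColors.INNOVATION
--     else:
--         return BFColors.INFO
-- ===== SOURCE B (Python) =====
-- # Flat keyword->(priority,color) map; single full pass keeping the minimum-priority hit.
-- _KEYWORDS = {
--     "executive": (0, "#6366f1"), "leadership": (0, "#6366f1"), "management": (0, "#6366f1"),
--     "engineering": (1, "#06b6d4"), "development": (1, "#06b6d4"), "technical": (1, "#06b6d4"),
--     "operations": (2, "#10b981"), "business": (2, "#10b981"),
--     "infrastructure": (3, "#f59e0b"), "systems": (3, "#f59e0b"), "network": (3, "#f59e0b"),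
--     "intelligence": (4, "#ec4899"), "analytics": (4, "#ec4899"), "data": (4, "#ec4899"),
--     "innovation": (5, "#a855f7"), "research": (5, "#a855f7"), "labs": (5, "#a855f7"),
-- }
--
--
-- def _get_department_color(dept_name: str) -> str:
--     """Get color for department based on name/type (min-priority reduction)."""
--     name_lower = dept_name.lower()
--     best = None
--     for kw, (prio, color) in _KEYWORDS.items():
--         if kw in name_lower and (best is None or prio < best[0]):
--             best = (prio, color)
--     return best[1] if best is not None else "#3b82f6"
-- ===== Notes on version B (the rewrite author's own statement) =====
-- stated objective: alternative
-- what changed: Replaces the ordered first-match if/elif chain over keyword groups by a single exhaustive pass over a flat keyword->(priority,color) map that keeps the minimum-priority hit in an accumulator.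
import Mathlib
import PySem

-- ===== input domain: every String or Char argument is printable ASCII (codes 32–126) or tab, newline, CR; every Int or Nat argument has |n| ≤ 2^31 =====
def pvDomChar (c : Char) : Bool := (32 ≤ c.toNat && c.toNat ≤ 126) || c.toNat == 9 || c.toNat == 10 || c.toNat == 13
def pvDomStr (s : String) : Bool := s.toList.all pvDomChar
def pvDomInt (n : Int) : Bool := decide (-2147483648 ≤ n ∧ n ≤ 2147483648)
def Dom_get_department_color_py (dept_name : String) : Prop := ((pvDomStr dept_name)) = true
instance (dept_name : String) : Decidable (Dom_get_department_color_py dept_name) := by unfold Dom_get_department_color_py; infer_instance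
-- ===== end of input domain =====

-- B replaces A's first-match if/elif chain by one exhaustive pass over a flat
-- keyword->(priority,color) map keeping the minimum-priority hit ("alternative").

-- ===== PORT A =====
-- Literal transliteration of A's if/elif chain.
def get_department_color_py (dept_name : String) : String :=
  let name_lower := PySem.Str.lower dept_name
  if (["executive", "leadership", "management"].any (fun x => PySem.Str.isIn x name_lower)) then
    "#6366f1"
  else if (["engineering", "development", "technical"].any (fun x => PySem.Str.isIn x name_lower)) then
    "#06b6d4"
  else if (["operations", "business"].any (fun x => PySem.Str.isIn x name_lower)) then
    "#10b981"
  else if (["infrastructure", "systems", "network"].any (fun x => PySem.Str.isIn x name_lower)) then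
    "#f59e0b"
  else if (["intelligence", "analytics", "data"].any (fun x => PySem.Str.isIn x name_lower)) then
    "#ec4899"
  else if (["innovation", "research", "labs"].any (fun x => PySem.Str.isIn x name_lower)) then
    "#a855f7"
  else
    "#3b82f6"

-- ===== PORT B =====
-- B's flat keyword -> (priority, color) map, in dict insertion order.
def pvKeywordMap : List (String × Nat × String) :=
  [ ("executive", 0, "#6366f1"), ("leadership", 0, "#6366f1"), ("management", 0, "#6366f1"),
    ("engineering", 1, "#06b6d4"), ("development", 1, "#06b6d4"), ("technical", 1, "#06b6d4"),
    ("operations", 2, "#10b981"), ("business", 2, "#10b981"),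
    ("infrastructure", 3, "#f59e0b"), ("systems", 3, "#f59e0b"), ("network", 3, "#f59e0b"),
    ("intelligence", 4, "#ec4899"), ("analytics", 4, "#ec4899"), ("data", 4, "#ec4899"),
    ("innovation", 5, "#a855f7"), ("research", 5, "#a855f7"), ("labs", 5, "#a855f7") ]

-- one loop step of B: keep the hit of smallest priority seen so far
def pvStep (name_lower : String) (best : Option (Nat × String)) (t : String × Nat × String) :
    Option (Nat × String) :=
  if PySem.Str.isIn t.1 name_lower
      && (match best with | none => true | some b => decide (t.2.1 < b.1)) then
    some t.2
  else
    best

def get_department_color_py_alt (dept_name : String) : String :=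
  let name_lower := PySem.Str.lower dept_name
  match pvKeywordMap.foldl (pvStep name_lower) none with
  | some b => b.2
  | none => "#3b82f6"

-- ===== PRECONDITION & SPEC =====
def Spec_get_department_color_py (dept_name : String) (out : String) : Prop := out = get_department_color_py_alt dept_name
instance (dept_name : String) (out : String) : Decidable (Spec_get_department_color_py dept_name out) := by unfold Spec_get_department_color_py; infer_instance

-- ===== CLAIM (what is proved, stated in full; the proofs are below) =====
def Claim_equal_get_department_color_py : Prop := ∀ (dept_name : String), Dom_get_department_color_py dept_name → Spec_get_department_color_py dept_name (get_department_color_py dept_name)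

-- ===== LEMMAS AND PROOFS =====

-- ===== VERDICT (by name: the statement is the Claim_ definition above) =====
theorem get_department_color_py_spec : Claim_equal_get_department_color_py := by
  intro dept_name _
  unfold Spec_get_department_color_py get_department_color_py get_department_color_py_alt
  generalize PySem.Str.lower dept_name = nl
  by_cases h1 : PySem.Str.isIn "executive" nl = true
  · simp at h1
    simp [pvKeywordMap, pvStep, h1]
  by_cases h2 : PySem.Str.isIn "leadership" nl = true
  · simp at h1 h2
    simp [pvKeywordMap, pvStep, h1, h2]
  by_cases h3 : PySem.Str.isIn "management" nl = true
  · simp at h1 h2 h3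
    simp [pvKeywordMap, pvStep, h1, h2, h3]
  by_cases h4 : PySem.Str.isIn "engineering" nl = true
  · simp at h1 h2 h3 h4
    simp [pvKeywordMap, pvStep, h1, h2, h3, h4]
  by_cases h5 : PySem.Str.isIn "development" nl = true
  · simp at h1 h2 h3 h4 h5
    simp [pvKeywordMap, pvStep, h1, h2, h3, h4, h5]
  by_cases h6 : PySem.Str.isIn "technical" nl = true
  · simp at h1 h2 h3 h4 h5 h6
    simp [pvKeywordMap, pvStep, h1, h2, h3, h4, h5, h6]
  by_cases h7 : PySem.Str.isIn "operations" nl = true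
  · simp at h1 h2 h3 h4 h5 h6 h7
    simp [pvKeywordMap, pvStep, h1, h2, h3, h4, h5, h6, h7]
  by_cases h8 : PySem.Str.isIn "business" nl = true
  · simp at h1 h2 h3 h4 h5 h6 h7 h8
    simp [pvKeywordMap, pvStep, h1, h2, h3, h4, h5, h6, h7, h8]
  by_cases h9 : PySem.Str.isIn "infrastructure" nl = true
  · simp at h1 h2 h3 h4 h5 h6 h7 h8 h9
    simp [pvKeywordMap, pvStep, h1, h2, h3, h4, h5, h6, h7, h8, h9]
  by_cases h10 : PySem.Str.isIn "systems" nl = true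
  · simp at h1 h2 h3 h4 h5 h6 h7 h8 h9 h10
    simp [pvKeywordMap, pvStep, h1, h2, h3, h4, h5, h6, h7, h8, h9, h10]
  by_cases h11 : PySem.Str.isIn "network" nl = true
  · simp at h1 h2 h3 h4 h5 h6 h7 h8 h9 h10 h11
    simp [pvKeywordMap, pvStep, h1, h2, h3, h4, h5, h6, h7, h8, h9, h10, h11]
  by_cases h12 : PySem.Str.isIn "intelligence" nl = true
  · simp at h1 h2 h3 h4 h5 h6 h7 h8 h9 h10 h11 h12
    simp [pvKeywordMap, pvStep, h1, h2, h3, h4, h5, h6, h7, h8, h9, h10, h11, h12]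
  by_cases h13 : PySem.Str.isIn "analytics" nl = true
  · simp at h1 h2 h3 h4 h5 h6 h7 h8 h9 h10 h11 h12 h13
    simp [pvKeywordMap, pvStep, h1, h2, h3, h4, h5, h6, h7, h8, h9, h10, h11, h12, h13]
  by_cases h14 : PySem.Str.isIn "data" nl = true
  · simp at h1 h2 h3 h4 h5 h6 h7 h8 h9 h10 h11 h12 h13 h14
    simp [pvKeywordMap, pvStep, h1, h2, h3, h4, h5, h6, h7, h8, h9, h10, h11, h12, h13, h14]
  by_cases h15 : PySem.Str.isIn "innovation" nl = true
  · simp at h1 h2 h3 h4 h5 h6 h7 h8 h9 h10 h11 h12 h13 h14 h15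
    simp [pvKeywordMap, pvStep, h1, h2, h3, h4, h5, h6, h7, h8, h9, h10, h11, h12, h13, h14, h15]
  by_cases h16 : PySem.Str.isIn "research" nl = true
  · simp at h1 h2 h3 h4 h5 h6 h7 h8 h9 h10 h11 h12 h13 h14 h15 h16
    simp [pvKeywordMap, pvStep, h1, h2, h3, h4, h5, h6, h7, h8, h9, h10, h11, h12, h13, h14, h15, h16]
  by_cases h17 : PySem.Str.isIn "labs" nl = true
  · simp at h1 h2 h3 h4 h5 h6 h7 h8 h9 h10 h11 h12 h13 h14 h15 h16 h17
    simp [pvKeywordMap, pvStep, h1, h2, h3, h4, h5, h6, h7, h8, h9, h10, h11, h12, h13, h14, h15, h16, h17]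
  simp at h1 h2 h3 h4 h5 h6 h7 h8 h9 h10 h11 h12 h13 h14 h15 h16 h17
  simp [pvKeywordMap, pvStep, h1, h2, h3, h4, h5, h6, h7, h8, h9, h10, h11, h12, h13, h14, h15, h16, h17]
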